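-- pv_equiv track=rewrite | github.com/owmm-vlm-project/OWMM-VLM | dataset_generate/habitat-lab/habitat-mas/habitat_mas/perception/mesh_utils.py | propagate_triangle_region_ids
-- ===== SOURCE A (Python) =====
-- def propagate_triangle_region_ids(triangle_region_ids, adjacency_list):
--     """
--     Propagates region IDs from triangles with known region IDs to neighboring triangles
--     that have no region ID (default -1), using a breadth-first search approach.
--
--     :param triangle_region_ids: A list of region IDs corresponding to each triangle, with -1 indicating no region ID.
--     :param adjacency_list: A list of lists, where each list contains the indices of neighboring triangles for each triangle.
--     :return: The updated list of region IDs after propagation.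
--     """
--
--     can_propagate = True
--     while can_propagate:
--         # For each iteration, we check all triangles can be propagated, and them batch assign region IDs
--         propagated_triangle_ids = []
--         propagated_region_ids = []
--         # For each non-labeled triangle, check if it can be labeled
--         for triangle_id, region_id in enumerate(triangle_region_ids):
--             if region_id == -1:
--                 # Get the neighboring triangles regions ids from adjacency_list
--                 neighbor_region_id_list = [
--                     triangle_region_ids[neighbor_id] for neighbor_id in adjacency_list[triangle_id]
--                 ]
--                 # if there is a neighbor with a region ID, propagate it
--                 if len(neighbor_region_id_list) > 0 and max(neighbor_region_id_list) != -1: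
--                     # random pick a non-negative region id from neighbors
--                     neighbor_region_id_list = [x for x in neighbor_region_id_list if x != -1]
--                     region_id = neighbor_region_id_list[0]
--                     propagated_triangle_ids.append(triangle_id)
--                     propagated_region_ids.append(region_id)
--
--         # If no triangle can be propagated, stop the loop
--         if len(propagated_triangle_ids) == 0:
--             can_propagate = False
--         else:
--             # Batch assign region IDs
--             for triangle_id, region_id in zip(propagated_triangle_ids, propagated_region_ids):
--                 triangle_region_ids[triangle_id] = region_id
--
--     return triangle_region_ids
-- ===== SOURCE B (Python) =====
-- def propagate_triangle_region_ids(triangle_region_ids, adjacency_list):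
--     """
--     Propagates region IDs from labeled triangles (region ID != -1) to unlabeled
--     ones (-1) in synchronous rounds: each round, every still-unlabeled candidate
--     triangle takes the first labeled neighbor's ID, and only triangles adjacent
--     to newly labeled ones are re-examined next round (via a reverse-adjacency
--     index built once up front).  Updates triangle_region_ids in place and
--     returns it.
--     """
--     n = len(triangle_region_ids)
--     unlabeled = [i for i in range(n) if triangle_region_ids[i] == -1]
--     rev = [[] for _ in range(n)]
--     for u in unlabeled:
--         for j in adjacency_list[u]:
--             rev[j].append(u)
--     candidates = unlabeled
--     while candidates:
--         updates = []
--         for u in candidates: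
--             labs = [triangle_region_ids[j] for j in adjacency_list[u]]
--             if labs and max(labs) != -1:
--                 lab = next(x for x in labs if x != -1)
--                 updates.append((u, lab))
--         if not updates:
--             break
--         for u, lab in updates:
--             triangle_region_ids[u] = lab
--         frontier = set()
--         for u, _ in updates:
--             for v in rev[u]:
--                 if triangle_region_ids[v] == -1:
--                     frontier.add(v)
--         candidates = sorted(frontier)
--     return triangle_region_ids
-- ===== Notes on version B (the rewrite author's own statement) =====
-- stated objective: alternative
-- what changed: A rescans every triangle in every propagation round; B builds a reverse-adjacency index (a list of per-triangle lists) once and runs a multi-source level-synchronous BFS in which, after the first sweep, only still-unlabeled triangles adjacent to the previous round's newly labeled ones are re-examined.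
import Mathlib
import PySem

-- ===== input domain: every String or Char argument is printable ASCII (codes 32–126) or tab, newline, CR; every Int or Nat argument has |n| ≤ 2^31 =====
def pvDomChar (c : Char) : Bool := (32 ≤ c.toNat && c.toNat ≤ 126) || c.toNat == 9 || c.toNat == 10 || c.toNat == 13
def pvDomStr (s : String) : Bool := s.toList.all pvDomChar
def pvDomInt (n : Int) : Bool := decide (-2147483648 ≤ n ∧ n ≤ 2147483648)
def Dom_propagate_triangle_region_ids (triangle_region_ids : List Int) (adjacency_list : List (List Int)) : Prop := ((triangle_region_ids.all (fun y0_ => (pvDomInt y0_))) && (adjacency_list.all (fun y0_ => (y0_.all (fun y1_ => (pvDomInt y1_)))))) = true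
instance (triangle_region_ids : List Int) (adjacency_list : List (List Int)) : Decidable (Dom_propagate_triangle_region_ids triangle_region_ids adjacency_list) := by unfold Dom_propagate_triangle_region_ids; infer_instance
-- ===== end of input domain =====

-- B replaces A's repeated full rescan of all triangles per round by a multi-source
-- level-synchronous BFS: a reverse-adjacency index (a list of per-triangle lists) built
-- once, after which only unlabeled triangles adjacent to the previous round's newly
-- labeled ones are re-examined.
-- Both A and B mutate the input list in place in Python; the equivalence proved here is
-- about the returned value (B performs the same in-place mutation).

-- ===== PORT A =====
-- one sweep of A's while-body: collect (propagated_triangle_ids, propagated_region_ids)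
def pvStepA (ids : List Int) (adj : List (List Int)) : List Int × List Int :=
  (PySem.List.enumerate ids).foldl
    (fun acc p =>
      if p.2 = -1 then
        let nbrs := (PySem.List.pyGetD adj p.1 []).map (fun j => PySem.List.pyGetD ids j 0)
        if 0 < nbrs.length ∧ (PySem.List.max? nbrs (fun x => x)).getD (-1) ≠ -1 then
          (acc.1 ++ [p.1],
           acc.2 ++ [PySem.List.pyGetD (nbrs.filter (fun x => decide (x ≠ -1))) 0 0])
        else acc
      else acc)
    ([], [])

-- A's while-loop; the fuel (#unlabeled + 1) is only a totality guard: each productive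
-- round labels at least one unlabeled triangle, so the fuel never runs out in Python.
def pvLoopA (adj : List (List Int)) : Nat → List Int → List Int
  | 0, ids => ids
  | fuel+1, ids =>
    let s := pvStepA ids adj
    if s.1 = [] then ids
    else pvLoopA adj fuel ((s.1.zip s.2).foldl (fun a q => PySem.List.pySetD a q.1 q.2) ids)

def propagate_triangle_region_ids (triangle_region_ids : List Int) (adjacency_list : List (List Int)) : List Int :=
  pvLoopA adjacency_list (triangle_region_ids.countP (fun x => decide (x = -1)) + 1) triangle_region_ids

-- ===== PORT B =====
-- rev[j].append(u) on the reverse-adjacency list of lists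
def pvAppendAt (rev : List (List Int)) (j : Int) (u : Int) : List (List Int) :=
  PySem.List.pySetD rev j (PySem.List.pyGetD rev j [] ++ [u])

-- one BFS round over the current candidate list: the (triangle, label) updates
def pvStepB (ids : List Int) (adj : List (List Int)) (cands : List Int) : List (Int × Int) :=
  cands.foldl
    (fun acc u =>
      let labs := (PySem.List.pyGetD adj u []).map (fun j => PySem.List.pyGetD ids j 0)
      if 0 < labs.length ∧ (PySem.List.max? labs (fun x => x)).getD (-1) ≠ -1 then
        acc ++ [(u, (labs.filter (fun x => decide (x ≠ -1))).headD 0)]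
      else acc)
    []

-- B's while-loop: apply the updates, then the next candidates are the still-unlabeled
-- reverse-neighbors of the just-labeled triangles (a set, listed in sorted order);
-- same totality-only fuel guard as in A's port.
def pvLoopB (adj : List (List Int)) (rev : List (List Int)) : Nat → List Int → List Int → List Int
  | 0, ids, _ => ids
  | fuel+1, ids, cands =>
    if cands = [] then ids
    else
      let updates := pvStepB ids adj cands
      if updates = [] then ids
      else
        let ids' := updates.foldl (fun a q => PySem.List.pySetD a q.1 q.2) ids
        let frontier := updates.foldl
          (fun s q => (PySem.List.pyGetD rev q.1 []).foldl
            (fun s v => if PySem.List.pyGetD ids' v 0 = -1 then PySem.Set.add s v else s) s)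
          PySem.Set.empty
        pvLoopB adj rev fuel ids' (PySem.List.sorted frontier (fun x => x))

def propagate_triangle_region_ids_alt (triangle_region_ids : List Int) (adjacency_list : List (List Int)) : List Int :=
  let n := triangle_region_ids.length
  let unlabeled := (PySem.List.pyRange 0 (n : Int)).filter
    (fun i => decide (PySem.List.pyGetD triangle_region_ids i 0 = -1))
  let rev := unlabeled.foldl
    (fun r u => (PySem.List.pyGetD adjacency_list u []).foldl (fun r j => pvAppendAt r j u) r)
    ((PySem.List.pyRange 0 (n : Int)).map (fun _ => ([] : List Int)))
  pvLoopB adjacency_list rev (triangle_region_ids.countP (fun x => decide (x = -1)) + 1)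
    triangle_region_ids unlabeled

-- ===== PRECONDITION & SPEC =====
-- Pre_ excludes exactly the inputs on which Python A raises IndexError: an unlabeled
-- triangle with no row in adjacency_list, or a neighbor index outside [-len, len).
def Pre_propagate_triangle_region_ids (triangle_region_ids : List Int) (adjacency_list : List (List Int)) : Prop :=
  ∀ p ∈ PySem.List.enumerate triangle_region_ids, p.2 = -1 →
    p.1 < (adjacency_list.length : Int) ∧
    ∀ j ∈ PySem.List.pyGetD adjacency_list p.1 [], PySem.Raise.InRange triangle_region_ids.length j

instance (triangle_region_ids : List Int) (adjacency_list : List (List Int)) : Decidable (Pre_propagate_triangle_region_ids triangle_region_ids adjacency_list) := by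
  unfold Pre_propagate_triangle_region_ids; infer_instance

def pvWitness_propagate_triangle_region_ids : List Int × List (List Int) := ([-1, 3], [[1], [0]])

def Spec_propagate_triangle_region_ids (triangle_region_ids : List Int) (adjacency_list : List (List Int)) (out : List Int) : Prop := out = propagate_triangle_region_ids_alt triangle_region_ids adjacency_list
instance (triangle_region_ids : List Int) (adjacency_list : List (List Int)) (out : List Int) : Decidable (Spec_propagate_triangle_region_ids triangle_region_ids adjacency_list out) := by unfold Spec_propagate_triangle_region_ids; infer_instance

-- ===== CLAIM (what is proved, stated in full; the proofs are below) =====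
def Claim_equal_propagate_triangle_region_ids : Prop := ∀ (triangle_region_ids : List Int) (adjacency_list : List (List Int)), Dom_propagate_triangle_region_ids triangle_region_ids adjacency_list → Pre_propagate_triangle_region_ids triangle_region_ids adjacency_list → Spec_propagate_triangle_region_ids triangle_region_ids adjacency_list (propagate_triangle_region_ids triangle_region_ids adjacency_list)

-- ===== LEMMAS AND PROOFS =====

-- the per-triangle rule both programs apply: neighbor labels, firing guard, chosen label
def pvLabs (ids : List Int) (adj : List (List Int)) (u : Int) : List Int :=
  (PySem.List.pyGetD adj u []).map (fun j => PySem.List.pyGetD ids j 0)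

def pvFire (ids : List Int) (adj : List (List Int)) (u : Int) : Bool :=
  decide (0 < (pvLabs ids adj u).length ∧ (PySem.List.max? (pvLabs ids adj u) (fun x => x)).getD (-1) ≠ -1)

def pvLab (ids : List Int) (adj : List (List Int)) (u : Int) : Int :=
  ((pvLabs ids adj u).filter (fun x => decide (x ≠ -1))).headD 0

def pvWrites (ids : List Int) (U : List (Int × Int)) : List Int :=
  U.foldl (fun a q => PySem.List.pySetD a q.1 q.2) ids

theorem pvStepA_aux (ids : List Int) (adj : List (List Int)) (l : List (Int × Int)) (acc : List Int × List Int) :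
    l.foldl
      (fun acc p =>
        if p.2 = -1 then
          let nbrs := (PySem.List.pyGetD adj p.1 []).map (fun j => PySem.List.pyGetD ids j 0)
          if 0 < nbrs.length ∧ (PySem.List.max? nbrs (fun x => x)).getD (-1) ≠ -1 then
            (acc.1 ++ [p.1],
             acc.2 ++ [PySem.List.pyGetD (nbrs.filter (fun x => decide (x ≠ -1))) 0 0])
          else acc
        else acc)
      acc
    = (acc.1 ++ ((l.filter (fun p => p.2 == -1 && pvFire ids adj p.1)).map (fun p => p.1)),
       acc.2 ++ ((l.filter (fun p => p.2 == -1 && pvFire ids adj p.1)).map (fun p => pvLab ids adj p.1))) := by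
  induction l generalizing acc with
  | nil => simp
  | cons p t ih =>
    simp only [List.foldl_cons, List.filter_cons]
    by_cases h2 : p.2 = -1
    · by_cases h : 0 < (pvLabs ids adj p.1).length ∧ (PySem.List.max? (pvLabs ids adj p.1) (fun x => x)).getD (-1) ≠ -1
      · have hf : (p.2 == -1 && pvFire ids adj p.1) = true := by simp [pvFire, h, h2]
        have h' := h; simp only [pvLabs] at h'
        have hfire : pvFire ids adj p.1 = true := by simp [pvFire, h]
        simp only [h2, if_pos h', ih, if_true]
        refine Prod.ext ?_ ?_ <;>
          simp [hfire, pvLab, pvLabs, PySem.List.pyGetD_zero, List.getD,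
            ← List.head?_eq_getElem?, List.head?_filter]
      · have hf : (p.2 == -1 && pvFire ids adj p.1) = false := by
          simp [pvFire, h2]
          intro h1
          by_contra hmax
          exact h ⟨h1, hmax⟩
        have h' := h; simp only [pvLabs] at h'
        have hfire : pvFire ids adj p.1 = false := decide_eq_false h
        simp only [h2, if_neg h', ih]
        simp [hfire]
    · have hf : (p.2 == -1 && pvFire ids adj p.1) = false := by simp [h2]
      simp only [if_neg h2, ih, hf]
      simp

theorem pvStepA_eq (ids : List Int) (adj : List (List Int)) :
    pvStepA ids adj =
      ((((PySem.List.enumerate ids).filter (fun p => p.2 == -1 && pvFire ids adj p.1)).map (fun p => p.1)),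
       (((PySem.List.enumerate ids).filter (fun p => p.2 == -1 && pvFire ids adj p.1)).map (fun p => pvLab ids adj p.1))) := by
  rw [pvStepA, pvStepA_aux]; simp

theorem pvStepB_aux (ids : List Int) (adj : List (List Int)) (l : List Int) (acc : List (Int × Int)) :
    l.foldl
      (fun acc u =>
        let labs := (PySem.List.pyGetD adj u []).map (fun j => PySem.List.pyGetD ids j 0)
        if 0 < labs.length ∧ (PySem.List.max? labs (fun x => x)).getD (-1) ≠ -1 then
          acc ++ [(u, (labs.filter (fun x => decide (x ≠ -1))).headD 0)]
        else acc)
      acc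
    = acc ++ (l.filter (pvFire ids adj)).map (fun u => (u, pvLab ids adj u)) := by
  induction l generalizing acc with
  | nil => simp
  | cons u t ih =>
    simp only [List.foldl_cons, List.filter_cons]
    by_cases h : 0 < (pvLabs ids adj u).length ∧ (PySem.List.max? (pvLabs ids adj u) (fun x => x)).getD (-1) ≠ -1
    · have hf : pvFire ids adj u = true := by simp [pvFire, h]
      simp only [pvLabs] at h
      simp only [hf, if_pos h, ih, if_true]
      simp [pvLab, pvLabs]
    · have hf : pvFire ids adj u = false := by simp [pvFire] at *; tauto
      simp only [pvLabs] at h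
      simp only [hf, if_neg h, ih]
      simp

theorem pvStepB_eq (ids : List Int) (adj : List (List Int)) (cands : List Int) :
    pvStepB ids adj cands = (cands.filter (pvFire ids adj)).map (fun u => (u, pvLab ids adj u)) := by
  rw [pvStepB, pvStepB_aux]; simp

theorem pvLab_ne (ids : List Int) (adj : List (List Int)) (u : Int)
    (h : pvFire ids adj u = true) : pvLab ids adj u ≠ -1 := by
  rw [pvFire, decide_eq_true_eq] at h
  obtain ⟨hlen, hmax⟩ := h
  have hne : pvLabs ids adj u ≠ [] := by
    intro hnil; rw [hnil] at hlen; simp at hlen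
  obtain ⟨m, hm⟩ : ∃ m, PySem.List.max? (pvLabs ids adj u) (fun x => x) = some m := by
    cases hmx : PySem.List.max? (pvLabs ids adj u) (fun x => x) with
    | none => exact absurd ((PySem.List.max?_eq_none_iff _ _).mp hmx) hne
    | some m => exact ⟨m, rfl⟩
  rw [hm] at hmax
  simp only [Option.getD_some] at hmax
  have hfil : (pvLabs ids adj u).filter (fun x => decide (x ≠ -1)) ≠ [] := by
    intro hnil
    have hall := List.filter_eq_nil_iff.mp hnil
    have hmmem := PySem.List.max?_mem hm
    have := hall m hmmem
    simp at this
    exact hmax this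
  have hmem : pvLab ids adj u ∈ (pvLabs ids adj u).filter (fun x => decide (x ≠ -1)) := by
    rw [pvLab]
    cases hc : (pvLabs ids adj u).filter (fun x => decide (x ≠ -1)) with
    | nil => exact absurd hc hfil
    | cons a t => simp
  have := List.of_mem_filter hmem
  simpa using this

theorem pvGetD_pySetD_int (xs : List Int) (t m v : Int)
    (ht0 : 0 ≤ t) (ht1 : t < (xs.length : Int)) (hm : 0 ≤ m) :
    PySem.List.pyGetD (PySem.List.pySetD xs t v) m 0 =
      if m = t then v else PySem.List.pyGetD xs m 0 := by
  obtain ⟨tn, rfl⟩ : ∃ tn : Nat, t = (tn : Int) := ⟨t.toNat, (Int.toNat_of_nonneg ht0).symm⟩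
  obtain ⟨mn, rfl⟩ : ∃ mn : Nat, m = (mn : Int) := ⟨m.toNat, (Int.toNat_of_nonneg hm).symm⟩
  have htn : tn < xs.length := by exact_mod_cast ht1
  rw [PySem.List.pyGetD_pySetD_natCast xs tn mn v 0 htn]
  by_cases h : mn = tn
  · simp [h]
  · have : ¬ ((mn : Int) = (tn : Int)) := by exact_mod_cast h
    simp [h, this]

theorem pvGetD_wrap {α : Type} (xs : List α) (j : Int) (d : α)
    (h0 : -(xs.length : Int) ≤ j) (h1 : j < (xs.length : Int)) :
    PySem.List.pyGetD xs j d = xs.getD (PySem.Int.mod j (xs.length : Int)).toNat d := by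
  have hlen : 0 < (xs.length : Int) := by omega
  rw [PySem.Int.mod_eq_emod_of_pos hlen]
  by_cases hj : 0 ≤ j
  · have hmod : j % (xs.length : Int) = j := Int.emod_eq_of_lt hj h1
    rw [hmod, PySem.List.pyGetD_eq_getElem xs d hj h1]
    rw [List.getD_eq_getElem?_getD, List.getElem?_eq_getElem (by omega), Option.getD_some]
  · have hk : j = -(((-j).toNat : Nat) : Int) := by omega
    have hk1 : 0 < (-j).toNat := by omega
    have hk2 : (-j).toNat ≤ xs.length := by omega
    rw [hk, PySem.List.pyGetD_neg_natCast xs (-j).toNat d hk1 hk2]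
    have hmod : (-(((-j).toNat : Nat) : Int)) % (xs.length : Int) = ((xs.length - (-j).toNat : Nat) : Int) := by
      have hjn : (((-j).toNat : Nat) : Int) = -j := Int.toNat_of_nonneg (by omega)
      rw [Int.natCast_sub hk2, hjn, neg_neg]
      have h2 : j % (xs.length : Int) = j + xs.length := by
        have h3 := Int.add_mul_emod_self_left (a := j) (b := (xs.length : Int)) (c := 1)
        rw [mul_one] at h3
        rw [← h3]
        exact Int.emod_eq_of_lt (by omega) (by omega)
      rw [h2]
      omega
    rw [hmod]
    rw [Int.toNat_natCast, List.getD_eq_getElem?_getD, List.getElem?_eq_getElem (by omega), Option.getD_some]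

theorem pvSetD_wrap {α : Type} (xs : List α) (j : Int) (v : α)
    (h0 : -(xs.length : Int) ≤ j) (h1 : j < (xs.length : Int)) :
    PySem.List.pySetD xs j v = xs.set (PySem.Int.mod j (xs.length : Int)).toNat v := by
  have hlen : 0 < (xs.length : Int) := by omega
  rw [PySem.Int.mod_eq_emod_of_pos hlen]
  by_cases hj : 0 ≤ j
  · have hmod : j % (xs.length : Int) = j := Int.emod_eq_of_lt hj h1
    rw [hmod, PySem.List.pySetD_of_nonneg xs v hj]
  · have hmod : j % (xs.length : Int) = j + xs.length := by
      have h3 := Int.add_mul_emod_self_left (a := j) (b := (xs.length : Int)) (c := 1)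
      rw [mul_one] at h3
      rw [← h3]
      exact Int.emod_eq_of_lt (by omega) (by omega)
    unfold PySem.List.pySetD PySem.List.pySet? PySem.List.pyIdx?
    split_ifs
    simp only [Option.map_some, Option.getD_some]
    congr 1
    omega

theorem pvGetD_pySetD_wrap (xs : List Int) (t j v : Int)
    (ht0 : 0 ≤ t) (_ht1 : t < (xs.length : Int))
    (hj0 : -(xs.length : Int) ≤ j) (hj1 : j < (xs.length : Int))
    (hne : PySem.Int.mod j (xs.length : Int) ≠ t) :
    PySem.List.pyGetD (PySem.List.pySetD xs t v) j 0 = PySem.List.pyGetD xs j 0 := by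
  have hlen : (PySem.List.pySetD xs t v).length = xs.length := PySem.List.length_pySetD xs t v
  have hmb : 0 ≤ PySem.Int.mod j (xs.length : Int) ∧ PySem.Int.mod j (xs.length : Int) < (xs.length : Int) := by
    constructor
    · exact PySem.Int.mod_nonneg _ (by omega)
    · exact PySem.Int.mod_lt _ (by omega)
  rw [pvGetD_wrap _ j 0 (by rw [hlen]; exact hj0) (by rw [hlen]; exact hj1),
      pvGetD_wrap xs j 0 hj0 hj1, hlen]
  rw [PySem.List.pySetD_of_nonneg xs v ht0]
  rw [List.getD_eq_getElem?_getD, List.getD_eq_getElem?_getD,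
      List.getElem?_set_ne (by omega)]

theorem pvWrites_length (ids : List Int) (U : List (Int × Int)) :
    (pvWrites ids U).length = ids.length := by
  induction U generalizing ids with
  | nil => rfl
  | cons q t ih => simp [pvWrites, List.foldl_cons] at *; rw [ih, PySem.List.length_pySetD]
theorem pvWrites_no_key (ids : List Int) (U : List (Int × Int)) (j : Int)
    (hU : ∀ q ∈ U, 0 ≤ q.1 ∧ q.1 < (ids.length : Int))
    (hj0 : -(ids.length : Int) ≤ j) (hj1 : j < (ids.length : Int))
    (hne : ∀ q ∈ U, PySem.Int.mod j (ids.length : Int) ≠ q.1) :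
    PySem.List.pyGetD (pvWrites ids U) j 0 = PySem.List.pyGetD ids j 0 := by
  induction U generalizing ids with
  | nil => rfl
  | cons q t ih =>
    have hq := hU q (by simp)
    have hl : (PySem.List.pySetD ids q.1 q.2).length = ids.length := PySem.List.length_pySetD _ _ _
    simp only [pvWrites, List.foldl_cons]
    have := ih (PySem.List.pySetD ids q.1 q.2)
      (fun r hr => by rw [hl]; exact hU r (List.mem_cons_of_mem _ hr))
      (by rw [hl]; exact hj0) (by rw [hl]; exact hj1)
      (fun r hr => by rw [hl]; exact hne r (List.mem_cons_of_mem _ hr))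
    simp only [pvWrites] at this
    rw [this, pvGetD_pySetD_wrap ids q.1 j q.2 hq.1 hq.2 hj0 hj1 (hne q (by simp))]
theorem pvWrites_neg_one (ids : List Int) (U : List (Int × Int)) (k : Int)
    (hU : ∀ q ∈ U, 0 ≤ q.1 ∧ q.1 < (ids.length : Int) ∧ q.2 ≠ -1) (hk : 0 ≤ k)
    (h : PySem.List.pyGetD (pvWrites ids U) k 0 = -1) :
    PySem.List.pyGetD ids k 0 = -1 ∧ ∀ q ∈ U, q.1 ≠ k := by
  induction U generalizing ids with
  | nil => exact ⟨h, by simp⟩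
  | cons q t ih =>
    have hq := hU q (by simp)
    have hl : (PySem.List.pySetD ids q.1 q.2).length = ids.length := PySem.List.length_pySetD _ _ _
    simp only [pvWrites, List.foldl_cons] at h
    have hrec := ih (PySem.List.pySetD ids q.1 q.2)
      (fun r hr => by rw [hl]; exact hU r (List.mem_cons_of_mem _ hr))
      (by simpa only [pvWrites] using h)
    obtain ⟨h1, h2⟩ := hrec
    rw [pvGetD_pySetD_int ids q.1 k q.2 hq.1 hq.2.1 hk] at h1
    by_cases hkq : k = q.1
    · rw [if_pos hkq] at h1; exact absurd h1 hq.2.2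
    · rw [if_neg hkq] at h1
      refine ⟨h1, ?_⟩
      intro r hr
      rcases List.mem_cons.mp hr with rfl | hr'
      · exact fun hh => hkq hh.symm
      · exact h2 r hr'
theorem pvMem_inner (ids' : List Int) (l : List Int) (s : PySem.Set Int) (y : Int) :
    (y ∈ l.foldl (fun s v => if PySem.List.pyGetD ids' v 0 = -1 then PySem.Set.add s v else s) s) ↔
      y ∈ s ∨ (y ∈ l ∧ PySem.List.pyGetD ids' y 0 = -1) := by
  induction l generalizing s with
  | nil => simp
  | cons v t ih =>
    simp only [List.foldl_cons]
    by_cases h : PySem.List.pyGetD ids' v 0 = -1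
    · rw [if_pos h, ih]
      simp only [PySem.Set.mem_add, List.mem_cons]
      constructor
      · rintro ((hs | rfl) | ⟨ht, hy⟩)
        · exact Or.inl hs
        · exact Or.inr ⟨Or.inl rfl, h⟩
        · exact Or.inr ⟨Or.inr ht, hy⟩
      · rintro (hs | ⟨(rfl | ht), hy⟩)
        · exact Or.inl (Or.inl hs)
        · exact Or.inl (Or.inr rfl)
        · exact Or.inr ⟨ht, hy⟩
    · rw [if_neg h, ih]
      simp only [List.mem_cons]
      constructor
      · rintro (hs | ⟨ht, hy⟩)
        · exact Or.inl hs
        · exact Or.inr ⟨Or.inr ht, hy⟩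
      · rintro (hs | ⟨(rfl | ht), hy⟩)
        · exact Or.inl hs
        · exact absurd hy h
        · exact Or.inr ⟨ht, hy⟩
theorem pvNodup_inner (ids' : List Int) (l : List Int) (s : PySem.Set Int) (hs : s.Nodup) :
    (l.foldl (fun s v => if PySem.List.pyGetD ids' v 0 = -1 then PySem.Set.add s v else s) s).Nodup := by
  induction l generalizing s with
  | nil => exact hs
  | cons v t ih =>
    simp only [List.foldl_cons]
    by_cases h : PySem.List.pyGetD ids' v 0 = -1
    · rw [if_pos h]; exact ih _ (PySem.Set.nodup_add s v hs)
    · rw [if_neg h]; exact ih _ hs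
theorem pvMem_frontier (rev : List (List Int)) (ids' : List Int)
    (U : List (Int × Int)) (s : PySem.Set Int) (y : Int) :
    (y ∈ U.foldl
        (fun s q => (PySem.List.pyGetD rev q.1 []).foldl
          (fun s v => if PySem.List.pyGetD ids' v 0 = -1 then PySem.Set.add s v else s) s)
        s) ↔
      y ∈ s ∨ ∃ q ∈ U, y ∈ PySem.List.pyGetD rev q.1 [] ∧ PySem.List.pyGetD ids' y 0 = -1 := by
  induction U generalizing s with
  | nil => simp
  | cons q t ih =>
    simp only [List.foldl_cons]
    rw [ih, pvMem_inner]
    constructor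
    · rintro ((hs | ⟨hm, hy⟩) | ⟨r, hr, hm, hy⟩)
      · exact Or.inl hs
      · exact Or.inr ⟨q, by simp, hm, hy⟩
      · exact Or.inr ⟨r, List.mem_cons_of_mem _ hr, hm, hy⟩
    · rintro (hs | ⟨r, hr, hm, hy⟩)
      · exact Or.inl (Or.inl hs)
      · rcases List.mem_cons.mp hr with rfl | hr'
        · exact Or.inl (Or.inr ⟨hm, hy⟩)
        · exact Or.inr ⟨r, hr', hm, hy⟩
theorem pvNodup_frontier (rev : List (List Int)) (ids' : List Int)
    (U : List (Int × Int)) (s : PySem.Set Int) (hs : s.Nodup) :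
    (U.foldl
        (fun s q => (PySem.List.pyGetD rev q.1 []).foldl
          (fun s v => if PySem.List.pyGetD ids' v 0 = -1 then PySem.Set.add s v else s) s)
        s).Nodup := by
  induction U generalizing s with
  | nil => exact hs
  | cons q t ih =>
    simp only [List.foldl_cons]
    exact ih _ (pvNodup_inner _ _ _ hs)
theorem pvSorted_pairwise_lt (l : List Int) (h : l.Nodup) :
    (PySem.List.sorted l (fun x => x)).Pairwise (· < ·) := by
  have h1 := PySem.List.sorted_pairwise l (fun x => x)
  have h2 : (PySem.List.sorted l (fun x => x)).Nodup :=
    (PySem.List.sorted_perm l (fun x => x) false).nodup_iff.mpr h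
  have := List.Pairwise.and h1 h2
  exact this.imp (fun ⟨hle, hne⟩ => lt_of_le_of_ne hle hne)

-- pyGetD at an Int index known to be a (casted) in-range Nat
theorem pvGetD_int_nonneg {α : Type} (xs : List α) (c : Int) (d : α)
    (h0 : 0 ≤ c) (h1 : c < (xs.length : Int)) :
    PySem.List.pyGetD xs c d = xs.getD c.toNat d := by
  rw [PySem.List.pyGetD_eq_getElem xs d h0 h1,
      List.getD_eq_getElem?_getD, List.getElem?_eq_getElem (by omega), Option.getD_some]

-- rev[j].append(u): length preserved, and its effect on any in-range slot c
theorem pvAppendAt_length (rev : List (List Int)) (j u : Int) :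
    (pvAppendAt rev j u).length = rev.length := PySem.List.length_pySetD _ _ _

theorem pvAppendAt_getD (rev : List (List Int)) (j u c : Int)
    (hj : PySem.Raise.InRange rev.length j) (hc0 : 0 ≤ c) (hc1 : c < (rev.length : Int)) :
    PySem.List.pyGetD (pvAppendAt rev j u) c []
      = PySem.List.pyGetD rev c [] ++
          (if PySem.Int.mod j (rev.length : Int) = c then [u] else []) := by
  obtain ⟨hj0, hj1⟩ := hj
  have hm0 : 0 ≤ PySem.Int.mod j (rev.length : Int) := PySem.Int.mod_nonneg _ (by omega)
  have hm1 : PySem.Int.mod j (rev.length : Int) < (rev.length : Int) := PySem.Int.mod_lt _ (by omega)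
  unfold pvAppendAt
  rw [pvSetD_wrap rev j _ hj0 hj1, pvGetD_wrap rev j [] hj0 hj1]
  rw [pvGetD_int_nonneg _ c [] hc0 (by rw [List.length_set]; exact hc1),
      pvGetD_int_nonneg rev c [] hc0 hc1]
  by_cases h : PySem.Int.mod j (rev.length : Int) = c
  · rw [if_pos h, h, List.getD_eq_getElem?_getD, List.getElem?_set_self (by omega), Option.getD_some]
  · rw [if_neg h, List.getD_eq_getElem?_getD, List.getElem?_set_ne (by omega), List.append_nil,
        ← List.getD_eq_getElem?_getD]

-- building the reverse-adjacency index: inner row fold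
theorem pvBuildRow_getD (u : Int) (row : List Int) (rev : List (List Int)) (c : Int)
    (hrow : ∀ j ∈ row, PySem.Raise.InRange rev.length j)
    (hc0 : 0 ≤ c) (hc1 : c < (rev.length : Int)) :
    PySem.List.pyGetD (row.foldl (fun r j => pvAppendAt r j u) rev) c []
      = PySem.List.pyGetD rev c [] ++
          ((row.map (fun j => (PySem.Int.mod j (rev.length : Int), u))).filter
            (fun p => p.1 == c)).map (fun p => p.2) := by
  induction row generalizing rev with
  | nil => simp
  | cons j t ih =>
    have hj := hrow j (by simp)
    have hl : (pvAppendAt rev j u).length = rev.length := pvAppendAt_length rev j u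
    simp only [List.foldl_cons, List.map_cons, List.filter_cons]
    rw [ih (pvAppendAt rev j u)
      (fun j' hj' => by rw [hl]; exact hrow j' (List.mem_cons_of_mem _ hj'))
      (by rw [hl]; exact hc1)]
    rw [hl, pvAppendAt_getD rev j u c hj hc0 hc1]
    by_cases h : PySem.Int.mod j (rev.length : Int) = c
    · simp [h]
    · simp [h]

theorem pvBuildRow_length (u : Int) (row : List Int) (rev : List (List Int)) :
    (row.foldl (fun r j => pvAppendAt r j u) rev).length = rev.length := by
  induction row generalizing rev with
  | nil => rfl
  | cons j t ih => simp only [List.foldl_cons]; rw [ih, pvAppendAt_length]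

theorem pvBuild_length (adj : List (List Int)) (unl : List Int) (rev : List (List Int)) :
    (unl.foldl (fun r u => (PySem.List.pyGetD adj u []).foldl (fun r j => pvAppendAt r j u) r) rev).length
      = rev.length := by
  induction unl generalizing rev with
  | nil => rfl
  | cons u t ih => simp only [List.foldl_cons]; rw [ih, pvBuildRow_length]

theorem pvBuild_getD (adj : List (List Int)) (n : Nat) (unl : List Int) (rev : List (List Int)) (c : Int)
    (hlen : rev.length = n)
    (hunl : ∀ u ∈ unl, ∀ j ∈ PySem.List.pyGetD adj u [], PySem.Raise.InRange n j)
    (hc0 : 0 ≤ c) (hc1 : c < (n : Int)) :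
    PySem.List.pyGetD
        (unl.foldl (fun r u => (PySem.List.pyGetD adj u []).foldl (fun r j => pvAppendAt r j u) r) rev)
        c []
      = PySem.List.pyGetD rev c [] ++
          ((unl.flatMap (fun u => (PySem.List.pyGetD adj u []).map
              (fun j => (PySem.Int.mod j (n : Int), u)))).filter
            (fun p => p.1 == c)).map (fun p => p.2) := by
  induction unl generalizing rev with
  | nil => simp
  | cons u t ih =>
    have hrl : ((PySem.List.pyGetD adj u []).foldl (fun r j => pvAppendAt r j u) rev).length = n := by
      rw [pvBuildRow_length, hlen]
    simp only [List.foldl_cons, List.flatMap_cons, List.filter_append, List.map_append]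
    rw [ih _ hrl (fun u' hu' => hunl u' (List.mem_cons_of_mem _ hu'))]
    rw [pvBuildRow_getD u _ rev c
      (fun j hj => by rw [hlen]; exact hunl u (by simp) j hj) hc0 (by rw [hlen]; exact hc1), hlen]
    rw [List.append_assoc]

-- every element stored anywhere in the built index came from unl
theorem pvMem_pySetD {α : Type} (xs : List α) (i : Int) (v x : α)
    (h : x ∈ PySem.List.pySetD xs i v) : x ∈ xs ∨ x = v := by
  unfold PySem.List.pySetD PySem.List.pySet? PySem.List.pyIdx? at h
  split_ifs at h <;>
    first
      | (simp only [Option.map_some, Option.getD_some] at h;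
         exact List.mem_or_eq_of_mem_set h)
      | (simp only [Option.map_none, Option.getD_none] at h; exact Or.inl h)

theorem pvAppendAt_sound (P : Int → Prop) (rev : List (List Int)) (j u : Int)
    (hrev : ∀ l ∈ rev, ∀ x ∈ l, P x) (hu : P u) :
    ∀ l ∈ pvAppendAt rev j u, ∀ x ∈ l, P x := by
  intro l hl x hx
  rcases pvMem_pySetD _ _ _ _ hl with hin | rfl
  · exact hrev l hin x hx
  · rcases List.mem_append.mp hx with hx' | hx'
    · by_cases hj : PySem.Raise.InRange rev.length j
      · exact hrev _ (PySem.List.pyGetD_mem rev [] hj) x hx'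
      · rw [PySem.List.pyGetD_of_none rev j [] ?_] at hx'
        · exact absurd hx' (List.not_mem_nil)
        · exact (PySem.List.pyGet?_eq_none_iff rev j).mpr hj
    · simp only [List.mem_singleton] at hx'
      exact hx' ▸ hu

theorem pvBuildRow_sound (P : Int → Prop) (u : Int) (row : List Int) (rev : List (List Int))
    (hrev : ∀ l ∈ rev, ∀ x ∈ l, P x) (hu : P u) :
    ∀ l ∈ row.foldl (fun r j => pvAppendAt r j u) rev, ∀ x ∈ l, P x := by
  induction row generalizing rev with
  | nil => exact hrev
  | cons j t ih =>
    simp only [List.foldl_cons]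
    exact ih _ (pvAppendAt_sound P rev j u hrev hu)

theorem pvBuild_sound (P : Int → Prop) (adj : List (List Int)) (unl : List Int) (rev : List (List Int))
    (hrev : ∀ l ∈ rev, ∀ x ∈ l, P x) (hunl : ∀ u ∈ unl, P u) :
    ∀ l ∈ unl.foldl (fun r u => (PySem.List.pyGetD adj u []).foldl (fun r j => pvAppendAt r j u) r) rev,
      ∀ x ∈ l, P x := by
  induction unl generalizing rev with
  | nil => exact hrev
  | cons u t ih =>
    simp only [List.foldl_cons]
    exact ih _ (pvBuildRow_sound P u _ rev hrev (hunl u (by simp)))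
      (fun u' hu' => hunl u' (List.mem_cons_of_mem _ hu'))

-- the per-round firing lists of A (over all triangles) and B (over the candidates) agree
theorem pvFilt_eq (ids : List Int) (adj : List (List Int)) (cands : List Int) (n : Nat)
    (hn : ids.length = n)
    (hc1 : ∀ u ∈ cands, 0 ≤ u ∧ u < (n : Int) ∧ PySem.List.pyGetD ids u 0 = -1)
    (hc2 : cands.Pairwise (· < ·))
    (hc3 : ∀ k : Int, 0 ≤ k → k < (n : Int) → PySem.List.pyGetD ids k 0 = -1 →
      pvFire ids adj k = true → k ∈ cands) :
    ((PySem.List.enumerate ids).filter (fun p => p.2 == -1 && pvFire ids adj p.1)).map (fun p => p.1)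
      = cands.filter (pvFire ids adj) := by
  have hpl : (((PySem.List.enumerate ids).filter (fun p => p.2 == -1 && pvFire ids adj p.1)).map (fun p => p.1)).Pairwise (· < ·) := by
    refine List.pairwise_map.mpr ?_
    exact (PySem.List.pairwise_lt_enumerate ids 0).filter _
  have hpr : (cands.filter (pvFire ids adj)).Pairwise (· < ·) := hc2.filter _
  have hmem : ∀ x : Int,
      (x ∈ ((PySem.List.enumerate ids).filter (fun p => p.2 == -1 && pvFire ids adj p.1)).map (fun p => p.1))
        ↔ x ∈ cands.filter (pvFire ids adj) := by
    intro x
    simp only [List.mem_map, List.mem_filter]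
    constructor
    · rintro ⟨p, hp, rfl⟩
      obtain ⟨hpe, hcond⟩ := hp
      obtain ⟨k, hk, rfl⟩ := (PySem.List.mem_enumerate_iff ids 0 p).mp hpe
      simp only [zero_add] at *
      have h2 : ids[k] = -1 ∧ pvFire ids adj (k : Int) = true := by
        simpa using hcond
      have hget : PySem.List.pyGetD ids (k : Int) 0 = -1 := by
        rw [PySem.List.pyGetD_natCast, List.getD_eq_getElem?_getD,
          List.getElem?_eq_getElem hk, Option.getD_some]
        exact h2.1
      exact ⟨hc3 k (by omega) (by exact_mod_cast (by omega : k < n)) hget h2.2, h2.2⟩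
    · rintro ⟨hx, hfire⟩
      obtain ⟨h0, h1, hu⟩ := hc1 x hx
      obtain ⟨kn, rfl⟩ : ∃ kn : Nat, x = (kn : Int) := ⟨x.toNat, (Int.toNat_of_nonneg h0).symm⟩
      have hkn : kn < ids.length := by omega
      have hgetk : ids[kn] = -1 := by
        rw [PySem.List.pyGetD_natCast, List.getD_eq_getElem?_getD,
          List.getElem?_eq_getElem hkn, Option.getD_some] at hu
        exact hu
      refine ⟨((kn : Int), ids[kn]), ⟨?_, ?_⟩, rfl⟩
      · exact (PySem.List.mem_enumerate_iff ids 0 _).mpr ⟨kn, hkn, by simp⟩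
      · simp [hgetk, hfire]
  have hnl : (((PySem.List.enumerate ids).filter (fun p => p.2 == -1 && pvFire ids adj p.1)).map (fun p => p.1)).Nodup :=
    hpl.imp (fun h => ne_of_lt h)
  have hnr : (cands.filter (pvFire ids adj)).Nodup := hpr.imp (fun h => ne_of_lt h)
  exact List.Perm.eq_of_pairwise
    (fun a b _ _ hab hba => le_antisymm (le_of_lt hab) (le_of_lt hba))
    hpl hpr ((List.perm_ext_iff_of_nodup hnl hnr).mpr hmem)

-- the round-for-round equivalence of the two loops
theorem pvLoop_eq (adj : List (List Int)) (rev : List (List Int)) (n : Nat)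
    (hrev_sound : ∀ c u, u ∈ PySem.List.pyGetD rev c [] → 0 ≤ u ∧ u < (n : Int))
    (fuel : Nat) :
    ∀ (ids : List Int) (cands : List Int), ids.length = n →
    (∀ k : Int, 0 ≤ k → k < (n : Int) → PySem.List.pyGetD ids k 0 = -1 →
      (k < (adj.length : Int) ∧
       (∀ j ∈ PySem.List.pyGetD adj k [], PySem.Raise.InRange n j) ∧
       (∀ j ∈ PySem.List.pyGetD adj k [], k ∈ PySem.List.pyGetD rev (PySem.Int.mod j (n : Int)) []))) →
    (∀ u ∈ cands, 0 ≤ u ∧ u < (n : Int) ∧ PySem.List.pyGetD ids u 0 = -1) →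
    cands.Pairwise (· < ·) →
    (∀ k : Int, 0 ≤ k → k < (n : Int) → PySem.List.pyGetD ids k 0 = -1 →
      pvFire ids adj k = true → k ∈ cands) →
    pvLoopA adj fuel ids = pvLoopB adj rev fuel ids cands := by
  induction fuel with
  | zero => intro ids cands _ _ _ _ _; rfl
  | succ f ih =>
    intro ids cands hn habout hc1 hc2 hc3
    have hkey := pvFilt_eq ids adj cands n hn hc1 hc2 hc3
    have hstepA := pvStepA_eq ids adj
    have hstepB := pvStepB_eq ids adj cands
    have hzip : ((pvStepA ids adj).1.zip (pvStepA ids adj).2) = pvStepB ids adj cands := by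
      rw [hstepA, hstepB, ← hkey, List.zip_map', List.map_map]
      rfl
    have hempty : ((pvStepA ids adj).1 = []) ↔ (pvStepB ids adj cands = []) := by
      rw [hstepA, hstepB, ← hkey]
      simp
    simp only [pvLoopA, pvLoopB]
    by_cases hcnil : cands = []
    · have hA : (pvStepA ids adj).1 = [] := by
        rw [hstepA, hkey, hcnil, List.filter_nil]
      rw [if_pos hA, if_pos hcnil]
    · rw [if_neg hcnil]
      by_cases hunil : pvStepB ids adj cands = []
      · rw [if_pos (hempty.mpr hunil), if_pos hunil]
      · rw [if_neg (fun h => hunil (hempty.mp h)), if_neg hunil, hzip]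
        have hU : ∀ q ∈ (pvStepB ids adj cands), (0 ≤ q.1 ∧ q.1 < (n : Int) ∧ q.2 ≠ -1) ∧
            pvFire ids adj q.1 = true ∧ PySem.List.pyGetD ids q.1 0 = -1 := by
          intro q hq
          rw [hstepB] at hq
          obtain ⟨u, hu, rfl⟩ := List.mem_map.mp hq
          obtain ⟨hcm, hfi⟩ := List.mem_filter.mp hu
          obtain ⟨b0, b1, bu⟩ := hc1 u hcm
          exact ⟨⟨b0, b1, pvLab_ne ids adj u hfi⟩, hfi, bu⟩
        have hUb : ∀ q ∈ (pvStepB ids adj cands), 0 ≤ q.1 ∧ q.1 < (ids.length : Int) := by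
          intro q hq; rw [hn]; exact ⟨(hU q hq).1.1, (hU q hq).1.2.1⟩
        have hUb' : ∀ q ∈ (pvStepB ids adj cands), 0 ≤ q.1 ∧ q.1 < (ids.length : Int) ∧ q.2 ≠ -1 := by
          intro q hq; rw [hn]; exact (hU q hq).1
        have hwl : (pvWrites ids (pvStepB ids adj cands)).length = n := by rw [pvWrites_length]; exact hn
        have hrecount : ∀ k : Int, 0 ≤ k →
            PySem.List.pyGetD (pvWrites ids (pvStepB ids adj cands)) k 0 = -1 →
            PySem.List.pyGetD ids k 0 = -1 ∧ ∀ q ∈ (pvStepB ids adj cands), q.1 ≠ k := by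
          intro k hk0 hget'
          exact pvWrites_neg_one ids (pvStepB ids adj cands) k hUb' hk0 hget'
        refine ih (pvWrites ids (pvStepB ids adj cands)) _ hwl ?_ ?_ ?_ ?_
        · intro k hk0 hkn hget'
          exact habout k hk0 hkn (hrecount k hk0 hget').1
        · intro u hu'
          have hmem := (PySem.List.mem_sorted _ _ _ _).mp hu'
          rw [pvMem_frontier] at hmem
          rcases hmem with hs | ⟨q, hqU, hrm, hg⟩
          · simp [PySem.Set.empty] at hs
          · exact ⟨(hrev_sound q.1 u hrm).1, (hrev_sound q.1 u hrm).2, hg⟩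
        · exact pvSorted_pairwise_lt _ (pvNodup_frontier rev (pvWrites ids (pvStepB ids adj cands)) (pvStepB ids adj cands) PySem.Set.empty List.nodup_nil)
        · intro k hk0 hkn hget' hfire'
          obtain ⟨hgid, hnk⟩ := hrecount k hk0 hget'
          obtain ⟨hadjlen, hrange, hrevc⟩ := habout k hk0 hkn hgid
          by_cases hhit : ∃ j ∈ PySem.List.pyGetD adj k [], ∃ q ∈ (pvStepB ids adj cands), PySem.Int.mod j (n : Int) = q.1
          · obtain ⟨j, hj, q, hqU, hjq⟩ := hhit
            have hkrev : k ∈ PySem.List.pyGetD rev q.1 [] := hjq ▸ hrevc j hj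
            refine (PySem.List.mem_sorted _ _ _ _).mpr ?_
            rw [pvMem_frontier]
            exact Or.inr ⟨q, hqU, hkrev, hget'⟩
          · exfalso
            simp only [not_exists, not_and] at hhit
            have hlabs : pvLabs (pvWrites ids (pvStepB ids adj cands)) adj k = pvLabs ids adj k := by
              simp only [pvLabs]
              refine List.map_congr_left ?_
              intro j hj
              have hr := hrange j hj
              refine pvWrites_no_key ids (pvStepB ids adj cands) j hUb ?_ ?_ ?_
              · rw [hn]; exact hr.1
              · rw [hn]; exact hr.2
              · intro q hq
                rw [hn]
                exact hhit j hj q hq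
            have hfire0 : pvFire ids adj k = true := by
              simp only [pvFire] at hfire' ⊢
              rw [hlabs] at hfire'
              exact hfire'
            have hkc : k ∈ cands := hc3 k hk0 hkn hgid hfire0
            have hkU : ∃ q ∈ (pvStepB ids adj cands), q.1 = k := by
              rw [hstepB]
              exact ⟨(k, pvLab ids adj k),
                List.mem_map.mpr ⟨k, List.mem_filter.mpr ⟨hkc, hfire0⟩, rfl⟩, rfl⟩
            obtain ⟨q, hqU, hq1⟩ := hkU
            exact hnk q hqU hq1

-- ===== VERDICT (by name: the statement is the Claim_ definition above) =====
theorem propagate_triangle_region_ids_spec : Claim_equal_propagate_triangle_region_ids := by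
  intro ids adj _hdom hpre
  unfold Spec_propagate_triangle_region_ids
  show pvLoopA adj (ids.countP (fun x => decide (x = -1)) + 1) ids = _
  simp only [propagate_triangle_region_ids_alt]
  set n := ids.length with hn
  set unl := (PySem.List.pyRange 0 (n : Int)).filter
    (fun i => decide (PySem.List.pyGetD ids i 0 = -1)) with hunl
  set rev0 := (PySem.List.pyRange 0 (n : Int)).map (fun _ => ([] : List Int)) with hrev0
  set rev := unl.foldl
    (fun r u => (PySem.List.pyGetD adj u []).foldl (fun r j => pvAppendAt r j u) r) rev0 with hrev
  have hunl_mem : ∀ u : Int, u ∈ unl ↔ (0 ≤ u ∧ u < (n : Int) ∧ PySem.List.pyGetD ids u 0 = -1) := by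
    intro u
    rw [hunl]
    simp only [List.mem_filter, PySem.List.mem_pyRange_one, decide_eq_true_eq]
    tauto
  have hrev0_len : rev0.length = n := by
    rw [hrev0, List.length_map, PySem.List.length_pyRange_one]
    omega
  have hrev_len : rev.length = n := by rw [hrev, pvBuild_length, hrev0_len]
  have hunl_range : ∀ u ∈ unl, ∀ j ∈ PySem.List.pyGetD adj u [], PySem.Raise.InRange n j := by
    intro u hu j hj
    obtain ⟨h0, h1, hg⟩ := (hunl_mem u).mp hu
    obtain ⟨kn, rfl⟩ : ∃ kn : Nat, u = (kn : Int) := ⟨u.toNat, (Int.toNat_of_nonneg h0).symm⟩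
    have hkn' : kn < ids.length := by omega
    have hgetk : ids[kn] = -1 := by
      rw [PySem.List.pyGetD_natCast, List.getD_eq_getElem?_getD,
        List.getElem?_eq_getElem hkn', Option.getD_some] at hg
      exact hg
    have hpe : ((kn : Int), ids[kn]) ∈ PySem.List.enumerate ids :=
      (PySem.List.mem_enumerate_iff ids 0 _).mpr ⟨kn, hkn', by simp⟩
    exact (hpre _ hpe hgetk).2 j hj
  have hrs : ∀ c u, u ∈ PySem.List.pyGetD rev c [] → 0 ≤ u ∧ u < (n : Int) := by
    intro c u hm
    have hP := pvBuild_sound (fun x => 0 ≤ x ∧ x < (n : Int)) adj unl rev0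
      (by
        intro l hl x hx
        rw [hrev0] at hl
        obtain ⟨-, -, rfl⟩ := List.mem_map.mp hl
        exact absurd hx (List.not_mem_nil))
      (fun u' hu' => ⟨((hunl_mem u').mp hu').1, ((hunl_mem u').mp hu').2.1⟩)
    by_cases hin : PySem.Raise.InRange rev.length c
    · exact hP _ (PySem.List.pyGetD_mem rev [] hin) u hm
    · rw [PySem.List.pyGetD_of_none rev c [] ((PySem.List.pyGet?_eq_none_iff rev c).mpr hin)] at hm
      exact absurd hm (List.not_mem_nil)
  have habout : ∀ k : Int, 0 ≤ k → k < (n : Int) → PySem.List.pyGetD ids k 0 = -1 →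
      (k < (adj.length : Int) ∧
       (∀ j ∈ PySem.List.pyGetD adj k [], PySem.Raise.InRange n j) ∧
       (∀ j ∈ PySem.List.pyGetD adj k [], k ∈ PySem.List.pyGetD rev (PySem.Int.mod j (n : Int)) [])) := by
    intro k hk0 hkn hget
    obtain ⟨kn, rfl⟩ : ∃ kn : Nat, k = (kn : Int) := ⟨k.toNat, (Int.toNat_of_nonneg hk0).symm⟩
    have hkn' : kn < ids.length := by omega
    have hgetk : ids[kn] = -1 := by
      rw [PySem.List.pyGetD_natCast, List.getD_eq_getElem?_getD,
        List.getElem?_eq_getElem hkn', Option.getD_some] at hget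
      exact hget
    have hpe : ((kn : Int), ids[kn]) ∈ PySem.List.enumerate ids :=
      (PySem.List.mem_enumerate_iff ids 0 _).mpr ⟨kn, hkn', by simp⟩
    have hp := hpre _ hpe hgetk
    have hkunl : (kn : Int) ∈ unl := (hunl_mem _).mpr ⟨hk0, hkn, hget⟩
    refine ⟨hp.1, hp.2, ?_⟩
    intro j hj
    have hjr : PySem.Raise.InRange n j := hp.2 j hj
    have hc0 : (0:Int) ≤ PySem.Int.mod j (n : Int) := PySem.Int.mod_nonneg _ (by omega)
    have hc1 : PySem.Int.mod j (n : Int) < (n : Int) := PySem.Int.mod_lt _ (by omega)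
    rw [hrev, pvBuild_getD adj n unl rev0 _ hrev0_len hunl_range hc0 hc1]
    refine List.mem_append.mpr (Or.inr ?_)
    refine List.mem_map.mpr ⟨(PySem.Int.mod j (n : Int), (kn : Int)), ?_, rfl⟩
    refine List.mem_filter.mpr ⟨?_, by simp⟩
    exact List.mem_flatMap.mpr ⟨(kn : Int), hkunl, List.mem_map.mpr ⟨j, hj, rfl⟩⟩
  have hc1 : ∀ u ∈ unl, 0 ≤ u ∧ u < (n : Int) ∧ PySem.List.pyGetD ids u 0 = -1 :=
    fun u hu => (hunl_mem u).mp hu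
  have hc2 : unl.Pairwise (· < ·) := by
    rw [hunl, PySem.List.pyRange_zero_natCast]
    refine List.Pairwise.filter _ ?_
    refine List.pairwise_map.mpr ?_
    exact (List.pairwise_lt_range).imp (fun h => by exact_mod_cast h)
  have hc3 : ∀ k : Int, 0 ≤ k → k < (n : Int) → PySem.List.pyGetD ids k 0 = -1 →
      pvFire ids adj k = true → k ∈ unl :=
    fun k hk0 hkn hget _ => (hunl_mem k).mpr ⟨hk0, hkn, hget⟩
  exact pvLoop_eq adj rev n hrs _ ids unl hn.symm habout hc1 hc2 hc3
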